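-- pv_equiv track=rewrite | github.com/prithviraj09rathod-shine/python_codes | DSA/LinkedLIst/isHappyNumeber.py | isHappy_num
-- ===== SOURCE A (Python) =====
-- def isHappy_num(n:int)->bool:
--     def get_next(number):
--         total_sum = 0
--         while number > 0:
--             digit = number % 10
--             total_sum += digit ** 2
--             number //= 10
--         return total_sum
--
--     slow = n
--     fast = get_next(n)
--
--     while fast != 1 and slow != fast:
--         slow = get_next(slow)
--         fast = get_next(get_next(fast))
--
--     return fast == 1
-- ===== SOURCE B (Python) =====
-- def isHappy_num(n: int) -> bool:
--     def squares(m):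
--         return 0 if m <= 0 else (m % 10) ** 2 + squares(m // 10)
--     while n not in (1, 4, 0):
--         n = squares(n)
--     return n == 1
-- ===== Notes on version B (the rewrite author's own statement) =====
-- stated objective: simpler
-- what changed: Replaced Floyd's slow/fast two-pointer cycle detection with a single walk of the digit-square-sum sequence that stops at the mathematically known absorbing states 1, 4 (every unhappy positive number enters the cycle through 4) and 0 (fixed point of nonpositive inputs), with a recursive digit-square-sum instead of the accumulator loop.
import Mathlib
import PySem

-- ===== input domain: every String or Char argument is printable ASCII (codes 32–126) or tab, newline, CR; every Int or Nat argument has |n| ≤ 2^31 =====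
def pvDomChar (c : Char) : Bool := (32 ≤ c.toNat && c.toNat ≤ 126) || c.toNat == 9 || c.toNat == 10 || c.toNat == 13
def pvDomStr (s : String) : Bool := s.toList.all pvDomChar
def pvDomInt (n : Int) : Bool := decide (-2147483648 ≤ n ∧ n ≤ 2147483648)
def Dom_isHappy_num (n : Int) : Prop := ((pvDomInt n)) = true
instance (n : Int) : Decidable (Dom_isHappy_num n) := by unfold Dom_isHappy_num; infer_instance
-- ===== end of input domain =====

-- B replaces A's two-pointer (slow/fast) Floyd cycle detection by a single walk of
-- the digit-square-sum sequence to its known absorbing states 1, 4 and 0;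
-- equivalence of return values is proved on Dom.

-- ===== PORT A =====
-- inner helper get_next: fuel bounds the digit loop; 64 ≥ number of decimal digits of any |n| ≤ 2^31
def getNextLoop : Nat → Int → Int → Int
  | 0, acc, _ => acc
  | f+1, acc, num =>
    if num > 0 then getNextLoop f (acc + (PySem.Int.mod num 10)^2) (PySem.Int.floordiv num 10)
    else acc

def getNext (n : Int) : Int := getNextLoop 64 0 n

-- A's while loop: fuel 2001 exceeds the iterations any |n| ≤ 2^31 needs (values drop below 811 after one step)
def floydLoop : Nat → Int → Int → Bool
  | 0, _, fast => fast == 1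
  | f+1, slow, fast =>
    if fast ≠ 1 ∧ slow ≠ fast then floydLoop f (getNext slow) (getNext (getNext fast))
    else fast == 1

def isHappy_num (n : Int) : Bool := floydLoop 2001 n (getNext n)

-- ===== PORT B =====
-- B's recursive digit-square-sum 'squares'; fuel 64 ≥ the digit count of any |n| ≤ 2^31
def squaresFuel : Nat → Int → Int
  | 0, _ => 0
  | f+1, m => if m ≤ 0 then 0 else (PySem.Int.mod m 10)^2 + squaresFuel f (PySem.Int.floordiv m 10)

def squares (m : Int) : Int := squaresFuel 64 m

-- B's while loop: walk the sequence until it hits one of the sentinels 1, 4, 0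
def walk : Nat → Int → Bool
  | 0, n => n == 1
  | f+1, n =>
    if n ≠ 1 ∧ n ≠ 4 ∧ n ≠ 0 then walk f (squares n)
    else n == 1

def isHappy_num_alt (n : Int) : Bool := walk 2001 n

-- ===== PRECONDITION & SPEC =====
def Spec_isHappy_num (n : Int) (out : Bool) : Prop := out = isHappy_num_alt n
instance (n : Int) (out : Bool) : Decidable (Spec_isHappy_num n out) := by unfold Spec_isHappy_num; infer_instance

-- ===== CLAIM (what is proved, stated in full; the proofs are below) =====
def Claim_equal_isHappy_num : Prop := ∀ (n : Int), Dom_isHappy_num n → Spec_isHappy_num n (isHappy_num n)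

-- ===== LEMMAS AND PROOFS =====

theorem floydLoop_succ (f : Nat) (s fa : Int) :
    floydLoop (f+1) s fa =
      if fa ≠ 1 ∧ s ≠ fa then floydLoop f (getNext s) (getNext (getNext fa)) else fa == 1 := rfl

theorem walk_succ (f : Nat) (n : Int) :
    walk (f+1) n = if n ≠ 1 ∧ n ≠ 4 ∧ n ≠ 0 then walk f (squares n) else n == 1 := rfl

-- B's helper computes the same value as A's helper
theorem getNextLoop_eq_squaresFuel : ∀ (f : Nat) (acc m : Int),
    getNextLoop f acc m = acc + squaresFuel f m := by
  intro f
  induction f with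
  | zero => intro acc m; simp [getNextLoop, squaresFuel]
  | succ f ih =>
    intro acc m
    by_cases h : m > 0
    · rw [getNextLoop, if_pos h, squaresFuel, if_neg (by omega), ih]
      ring
    · rw [getNextLoop, if_neg h, squaresFuel, if_pos (by omega)]
      ring

theorem squares_eq_getNext (m : Int) : squares m = getNext m := by
  unfold squares getNext
  rw [getNextLoop_eq_squaresFuel]
  ring

theorem getNextLoop_nonpos (f : Nat) (acc num : Int) (h : num ≤ 0) :
    getNextLoop f acc num = acc := by
  cases f with
  | zero => rfl
  | succ f => rw [getNextLoop, if_neg (by omega)]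

theorem getNext_nonpos (n : Int) (h : n ≤ 0) : getNext n = 0 :=
  getNextLoop_nonpos 64 0 n h

theorem getNextLoop_bounds (k : Nat) : ∀ (fuel : Nat) (acc num : Int), 0 ≤ acc → 0 ≤ num →
    num < 10 ^ (k : Nat) → k ≤ fuel →
    acc ≤ getNextLoop fuel acc num ∧ getNextLoop fuel acc num ≤ acc + 81 * k := by
  induction k with
  | zero =>
    intro fuel acc num h0 h1 h2 _
    have : num = 0 := by simpa using le_antisymm (by simpa using Int.lt_add_one_iff.mp h2) h1
    rw [this, getNextLoop_nonpos fuel acc 0 le_rfl]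
    omega
  | succ k ih =>
    intro fuel acc num h0 h1 h2 hf
    cases fuel with
    | zero => omega
    | succ f =>
      by_cases hpos : num > 0
      · rw [getNextLoop, if_pos hpos]
        have hmod : PySem.Int.mod num 10 = num % 10 := PySem.Int.mod_eq_emod_of_pos (by norm_num)
        have hdiv : PySem.Int.floordiv num 10 = num / 10 := PySem.Int.floordiv_eq_ediv_of_pos (by norm_num)
        have hpow : (10 : Int) ^ (k + 1 : Nat) = 10 ^ (k : Nat) * 10 := pow_succ 10 k
        have hd0 : 0 ≤ num % 10 := Int.emod_nonneg num (by norm_num)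
        have hd9 : num % 10 ≤ 9 := by omega
        have hsq : (num % 10) ^ 2 ≤ 81 := by nlinarith [sq_nonneg (num % 10)]
        have hsq0 : 0 ≤ (num % 10) ^ 2 := sq_nonneg _
        have hq0 : 0 ≤ num / 10 := Int.ediv_nonneg h1 (by norm_num)
        have hqlt : num / 10 < 10 ^ (k : Nat) := by
          rw [hpow] at h2; omega
        have := ih f (acc + (num % 10) ^ 2) (num / 10) (by omega) hq0 hqlt (by omega)
        rw [hmod, hdiv]
        push_cast at this ⊢
        omega
      · rw [getNextLoop, if_neg hpos]
        have : 0 ≤ (81 : Int) * (k + 1 : Nat) := by positivity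
        push_cast at this ⊢
        omega

theorem getNext_range (n : Int) (h0 : 0 ≤ n) (h : n < 10000000000) :
    0 ≤ getNext n ∧ getNext n ≤ 810 := by
  have h10 : (10 : Int) ^ (10 : Nat) = 10000000000 := by norm_num
  have := getNextLoop_bounds 10 64 0 n le_rfl h0 (by omega) (by norm_num)
  unfold getNext
  omega

-- finite checks over the band [0,810] the state lives in after one step
set_option maxRecDepth 100000 in
set_option maxHeartbeats 4000000 in
theorem finiteCheckSmall :
    ((List.range 811).all fun j => isHappy_num (Int.ofNat j) == isHappy_num_alt (Int.ofNat j)) = true := by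
  decide

set_option maxRecDepth 100000 in
set_option maxHeartbeats 4000000 in
theorem finiteCheckMid :
    ((List.range 811).all fun j =>
      (if (Int.ofNat j) = 1 then true else floydLoop 2000 (Int.ofNat j) (getNext (getNext (Int.ofNat j))))
        == walk 2000 (Int.ofNat j)) = true := by
  decide

theorem smallEq (m : Int) (h0 : 0 ≤ m) (h1 : m ≤ 810) : isHappy_num m = isHappy_num_alt m := by
  have hj : m.toNat < 811 := by omega
  have h := List.all_eq_true.mp finiteCheckSmall m.toNat (List.mem_range.mpr hj)
  have hm : Int.ofNat m.toNat = m := Int.toNat_of_nonneg h0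
  rw [hm] at h
  exact beq_iff_eq.mp h

theorem midEq (m : Int) (h0 : 0 ≤ m) (h1 : m ≤ 810) :
    (if m = 1 then true else floydLoop 2000 m (getNext (getNext m))) = walk 2000 m := by
  have hj : m.toNat < 811 := by omega
  have h := List.all_eq_true.mp finiteCheckMid m.toNat (List.mem_range.mpr hj)
  have hm : Int.ofNat m.toNat = m := Int.toNat_of_nonneg h0
  rw [hm] at h
  exact beq_iff_eq.mp h

-- ===== VERDICT (by name: the statement is the Claim_ definition above) =====
theorem isHappy_num_spec : Claim_equal_isHappy_num := by
  intro n hdom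
  unfold Spec_isHappy_num
  have hdom' : -2147483648 ≤ n ∧ n ≤ 2147483648 := by
    simpa [Dom_isHappy_num, pvDomInt] using hdom
  by_cases hneg : n < 0
  · -- negative n: both sides reach the fixed point 0 and return false
    have g0 : getNext n = 0 := getNext_nonpos n (by omega)
    have hA : isHappy_num n = false := by
      unfold isHappy_num
      rw [show (2001 : Nat) = 2000 + 1 from rfl, floydLoop_succ, g0,
        if_pos ⟨by norm_num, by omega⟩, getNext_nonpos 0 le_rfl, getNext_nonpos 0 le_rfl]
      decide
    have hB : isHappy_num_alt n = false := by
      unfold isHappy_num_alt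
      rw [show (2001 : Nat) = 2000 + 1 from rfl, walk_succ,
        if_pos ⟨by omega, by omega, by omega⟩, squares_eq_getNext, g0,
        show (2000 : Nat) = 1999 + 1 from rfl, walk_succ, if_neg (by simp)]
      decide
    rw [hA, hB]
  · by_cases hsm : n ≤ 810
    · exact smallEq n (by omega) hsm
    · -- n ≥ 811: after one loop iteration both sides run over the band [0,810]
      have hg : 0 ≤ getNext n ∧ getNext n ≤ 810 := getNext_range n (by omega) (by omega)
      have hne : n ≠ getNext n := by omega
      have hB : isHappy_num_alt n = walk 2000 (getNext n) := by
        unfold isHappy_num_alt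
        rw [show (2001 : Nat) = 2000 + 1 from rfl, walk_succ,
          if_pos ⟨by omega, by omega, by omega⟩, squares_eq_getNext]
      unfold isHappy_num
      rw [show (2001 : Nat) = 2000 + 1 from rfl, floydLoop_succ, hB, ← midEq (getNext n) hg.1 hg.2]
      by_cases h1 : getNext n = 1
      · rw [if_neg (by simp [h1]), if_pos h1, h1]
        rfl
      · rw [if_pos ⟨h1, hne⟩, if_neg h1]
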